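-- pv_equiv track=rewrite | github.com/pedroblackjsousa/csgostatsportugal | csgostats.py | findlastround
-- ===== SOURCE A (Python) =====
-- def findlastround(list):
-- 	roundevents = []
-- 	endofround = True
-- 	for element in list:
-- 		if endofround:
-- 			if "round_start" in element:
-- 				endofround = False
-- 		else:
-- 			roundevents.append(element)
-- 			if "round_start" in element:
-- 				return roundevents
-- 	return roundevents
-- ===== SOURCE B (Python) =====
-- def findlastround(list):
--     indices = [i for i, e in enumerate(list) if "round_start" in e]
--     if not indices:
--         return []
--     if len(indices) >= 2:
--         return list[indices[0] + 1 : indices[1] + 1]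
--     return list[indices[0] + 1 :]
-- ===== Notes on version B (the rewrite author's own statement) =====
-- stated objective: simpler
-- what changed: Replaces the boolean state-machine accumulation loop with building a table of marker indices once and returning a single slice between the first two markers.
import Mathlib
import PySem

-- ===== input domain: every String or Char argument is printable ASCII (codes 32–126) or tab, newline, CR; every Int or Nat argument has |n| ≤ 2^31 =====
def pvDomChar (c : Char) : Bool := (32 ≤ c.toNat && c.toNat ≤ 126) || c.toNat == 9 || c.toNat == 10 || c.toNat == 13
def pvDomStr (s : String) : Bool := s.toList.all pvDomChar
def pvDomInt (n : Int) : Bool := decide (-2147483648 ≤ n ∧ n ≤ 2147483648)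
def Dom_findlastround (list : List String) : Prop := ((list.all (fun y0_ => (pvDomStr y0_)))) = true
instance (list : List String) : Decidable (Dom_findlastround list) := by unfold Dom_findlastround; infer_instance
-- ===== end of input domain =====

-- B replaces A's boolean state-machine loop with a marker-index table plus one slice; objective: simpler.

-- ===== PORT A =====
-- the loop of A: state (roundevents, endofround); early return inside the else branch
def findlastroundGo (l : List String) (roundevents : List String) (endofround : Bool) : List String :=
  match l with
  | [] => roundevents
  | e :: rest =>
    if endofround then
      if PySem.Str.isIn "round_start" e then findlastroundGo rest roundevents false
      else findlastroundGo rest roundevents true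
    else
      if PySem.Str.isIn "round_start" e then roundevents ++ [e]
      else findlastroundGo rest (roundevents ++ [e]) false

def findlastround (list : List String) : List String :=
  findlastroundGo list [] true

-- ===== PORT B =====
-- the comprehension [i for i, e in enumerate(list) if "round_start" in e]
def flrIndices (l : List String) (i : Nat) : List Nat :=
  match l with
  | [] => []
  | e :: rest =>
    if PySem.Str.isIn "round_start" e then i :: flrIndices rest (i + 1)
    else flrIndices rest (i + 1)

def findlastround_alt (list : List String) : List String :=
  match flrIndices list 0 with
  | [] => []
  | i0 :: i1 :: _ => PySem.List.slice list (some ((i0 : Int) + 1)) (some ((i1 : Int) + 1))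
  | [i0] => PySem.List.slice list (some ((i0 : Int) + 1)) none

-- ===== PRECONDITION & SPEC =====
def Spec_findlastround (list : List String) (out : List String) : Prop := out = findlastround_alt list
instance (list : List String) (out : List String) : Decidable (Spec_findlastround list out) := by unfold Spec_findlastround; infer_instance

-- ===== CLAIM (what is proved, stated in full; the proofs are below) =====
def Claim_equal_findlastround : Prop := ∀ (list : List String), Dom_findlastround list → Spec_findlastround list (findlastround list)

-- ===== LEMMAS AND PROOFS =====

-- the elements of l up to and including the first marker element (all of l if none)
def flrTru (l : List String) : List String :=
  match l with
  | [] => []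
  | e :: rest => if PySem.Str.isIn "round_start" e then [e] else e :: flrTru rest

theorem flrGo_false (l : List String) (acc : List String) :
    findlastroundGo l acc false = acc ++ flrTru l := by
  induction l generalizing acc with
  | nil => simp [findlastroundGo, flrTru]
  | cons e rest ih =>
    by_cases h : PySem.Str.isIn "round_start" e = true
    · simp only [findlastroundGo, flrTru, h]; simp
    · simp only [findlastroundGo, flrTru, h]; simp [ih]

theorem flrIndices_shift (l : List String) (i : Nat) :
    flrIndices l i = (flrIndices l 0).map (· + i) := by
  induction l generalizing i with
  | nil => simp [flrIndices]
  | cons e rest ih =>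
    by_cases h : PySem.Str.isIn "round_start" e = true <;>
        simp only [flrIndices, h, ih (i + 1), ih 1] <;>
      simp <;> exact fun x _ => by omega

-- flrTru = take through the first marker index
theorem flrTru_of_indices (l : List String) :
    flrTru l = (match flrIndices l 0 with
                | [] => l
                | j :: _ => l.take (j + 1)) := by
  induction l with
  | nil => simp [flrTru, flrIndices]
  | cons e rest ih =>
    by_cases h : PySem.Str.isIn "round_start" e = true
    · simp only [flrTru, flrIndices, h]; simp
    · simp only [flrTru, flrIndices, h, flrIndices_shift rest 1, ih]
      cases hr : flrIndices rest 0 with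
      | nil => simp
      | cons j t => simp [List.take_succ_cons]

theorem flr_main (l : List String) : findlastround l = findlastround_alt l := by
  induction l with
  | nil => simp [findlastround, findlastroundGo, findlastround_alt, flrIndices]
  | cons e rest ih =>
    by_cases h : PySem.Str.isIn "round_start" e = true
    · -- head is a marker: A enters collecting phase with empty accumulator
      have hA : findlastround (e :: rest) = flrTru rest := by
        simp only [findlastround, findlastroundGo, h]
        simp [flrGo_false]
      rw [hA, flrTru_of_indices]
      simp only [findlastround_alt, flrIndices, h, flrIndices_shift rest 1]
      cases hr : flrIndices rest 0 with
      | nil => simp [PySem.List.slice_from_one]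
      | cons j t =>
        simp
        have h2 : ((j : Int) + 1 + 1) = ((j + 2 : Nat) : Int) := by push_cast; ring
        have h1 : (1 : Int) = ((1 : Nat) : Int) := by norm_num
        rw [h2, h1, PySem.List.slice_natCast]
        simp
    · -- head is not a marker: A stays in skipping phase
      have hA : findlastround (e :: rest) = findlastround rest := by
        simp only [findlastround, findlastroundGo, h]
        simp
      rw [hA, ih]
      simp only [findlastround_alt, flrIndices, h, flrIndices_shift rest 1]
      cases hr : flrIndices rest 0 with
      | nil => simp
      | cons i0 t =>
        cases t with
        | nil =>
          simp
          have h2 : ((i0 : Int) + 1 + 1) = ((i0 + 2 : Nat) : Int) := by push_cast; ring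
          have h1 : ((i0 : Int) + 1) = ((i0 + 1 : Nat) : Int) := by push_cast; ring
          rw [h2, h1, PySem.List.slice_from_natCast, PySem.List.slice_from_natCast]
          simp
        | cons i1 t2 =>
          simp
          have h2 : ((i0 : Int) + 1 + 1) = ((i0 + 2 : Nat) : Int) := by push_cast; ring
          have h4 : ((i1 : Int) + 1 + 1) = ((i1 + 2 : Nat) : Int) := by push_cast; ring
          have h1 : ((i0 : Int) + 1) = ((i0 + 1 : Nat) : Int) := by push_cast; ring
          have h3 : ((i1 : Int) + 1) = ((i1 + 1 : Nat) : Int) := by push_cast; ring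
          rw [h2, h4, h1, h3, PySem.List.slice_natCast, PySem.List.slice_natCast]
          simp only [List.drop_succ_cons]
          congr 1
          omega

-- ===== VERDICT (by name: the statement is the Claim_ definition above) =====
theorem findlastround_spec : Claim_equal_findlastround := by
  intro l _
  unfold Spec_findlastround
  exact flr_main l
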